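-- pv_equiv track=rewrite | github.com/mohos26/Challenges | Python/Hard/Folder Challenge (Part #1).py | is_it_inside
-- ===== SOURCE A (Python) =====
-- def is_it_inside(folders, X, Y):
-- 	if X == Y:
-- 		return True
-- 	if Y in folders.keys():
-- 		lst = folders[Y]
-- 		if X in lst:
-- 			return True
-- 		for arg in lst:
-- 			if is_it_inside(folders, X, arg):
-- 				return True
-- 	return False
-- ===== SOURCE B (Python) =====
-- def is_it_inside(folders, X, Y):
--     # Compute the set of folders reachable from Y by iterated expansion
--     # (transitive-closure saturation); any reachable X lies within
--     # len(folders) + 1 expansion rounds, and we stop early at a fixpoint.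
--     reach = {Y}
--     for _ in range(len(folders) + 1):
--         new = set(reach)
--         for node in reach:
--             for child in folders.get(node, []):
--                 new.add(child)
--         if new == reach:
--             break
--         reach = new
--     return X in reach
-- ===== Notes on version B (the rewrite author's own statement) =====
-- stated objective: alternative
-- what changed: A's visited-free recursive DFS is replaced by iterative reachable-set saturation (at most len(folders)+1 expansion rounds with an early fixpoint exit), which also terminates on cyclic folder graphs where A's recursion diverges.
import Mathlib
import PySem

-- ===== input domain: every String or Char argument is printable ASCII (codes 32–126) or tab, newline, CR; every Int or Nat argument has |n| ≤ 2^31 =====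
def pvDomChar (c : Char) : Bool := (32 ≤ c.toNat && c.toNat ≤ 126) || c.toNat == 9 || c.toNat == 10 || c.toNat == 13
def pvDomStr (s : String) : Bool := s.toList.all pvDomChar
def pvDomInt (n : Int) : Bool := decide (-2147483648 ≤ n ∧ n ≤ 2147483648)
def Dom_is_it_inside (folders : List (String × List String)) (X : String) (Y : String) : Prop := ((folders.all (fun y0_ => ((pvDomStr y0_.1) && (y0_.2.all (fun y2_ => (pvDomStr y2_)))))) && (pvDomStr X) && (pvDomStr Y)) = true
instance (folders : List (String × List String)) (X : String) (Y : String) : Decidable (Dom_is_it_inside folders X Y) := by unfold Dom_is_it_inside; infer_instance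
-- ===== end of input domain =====

-- B replaces A's visited-free recursive DFS by iterative reachable-set
-- saturation with a fixpoint exit (same return value wherever A returns;
-- B also terminates on the cyclic inputs where A's recursion diverges).

-- ===== PORT A =====
-- A's recursion carries no visited set, so the Lean port is made total with a
-- fuel counter; fuel folders.length + 1 bounds the depth a shortest witness
-- path needs (its intermediate nodes are distinct keys), so the port returns
-- A's value on every input on which the Python A returns.
def goA (folders : List (String × List String)) (X : String) : Nat → String → Bool
  | 0, _ => false
  | fuel + 1, Y =>
    if X == Y then true
    else
      match (PySem.Dict.mk folders).get? Y with
      | some lst =>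
        if lst.contains X then true
        else lst.any (fun arg => goA folders X fuel arg)
      | none => false

def is_it_inside (folders : List (String × List String)) (X : String) (Y : String) : Bool :=
  goA folders X (folders.length + 1) Y

-- ===== PORT B =====
-- one expansion round: new = set(reach); for node in reach: for child in folders.get(node, []): new.add(child)
def stepB (folders : List (String × List String)) (reach : List String) : List String :=
  reach.foldl
    (fun nw node => ((PySem.Dict.mk folders).getD node []).foldl (fun s c => PySem.Set.add s c) nw)
    reach

-- the for-range loop with the fixpoint break
def loopB (folders : List (String × List String)) : Nat → List String → List String
  | 0, reach => reach
  | f + 1, reach =>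
    let nw := stepB folders reach
    if nw == reach then reach else loopB folders f nw

def is_it_inside_alt (folders : List (String × List String)) (X : String) (Y : String) : Bool :=
  (loopB folders (folders.length + 1) (PySem.Set.ofList [Y])).contains X

-- ===== PRECONDITION & SPEC =====
-- Helpers for Pre_: a closed-form description of the inputs on which A's
-- recursion diverges.  A folder y is "accepting" (pvIsT) when A returns True
-- at y without recursing (y == X, or X is a direct child of y).
def pvChildren (folders : List (String × List String)) (y : String) : List String :=
  (PySem.Dict.mk folders).getD y []

def pvIsT (folders : List (String × List String)) (X : String) (y : String) : Bool :=
  (y == X) || (pvChildren folders y).contains X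

-- one saturation round expanding only non-accepting folders
def pvNtStep (folders : List (String × List String)) (X : String) (s : List String) : List String :=
  s.foldl
    (fun acc u =>
      if pvIsT folders X u then acc
      else (pvChildren folders u).foldl (fun a c => PySem.Set.add a c) acc)
    s

-- some accepting folder is reachable from c through non-accepting folders
-- (folders.length + 1 saturation rounds close the relation: a shortest such
-- path repeats no folder name)
def pvNtReachT (folders : List (String × List String)) (X : String) (c : String) : Bool :=
  ((List.range (folders.length + 1)).foldl (fun s _ => pvNtStep folders X s)
      (PySem.Set.ofList [c])).any (pvIsT folders X)

-- scan of one child list: an earlier child whose subtree contains an accepting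
-- folder blocks all later children (A would return True or already diverge there)
def pvScanDiv (folders : List (String × List String)) (X : String)
    (go : String → Bool) : List String → Bool
  | [] => false
  | v :: rest =>
    if !pvIsT folders X v && go v then true
    else if pvNtReachT folders X v then false
    else pvScanDiv folders X go rest

-- search for a cycle of non-accepting folders reachable from y along a path
-- whose earlier branches contain no accepting folder (= exactly where A diverges)
def pvGoDiv (folders : List (String × List String)) (X : String) :
    Nat → List String → String → Bool
  | 0, _, _ => false
  | f + 1, path, y =>
    pvScanDiv folders X
      (fun v => (y :: path).contains v || pvGoDiv folders X f (y :: path) v)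
      (pvChildren folders y)

def pvDiverges (folders : List (String × List String)) (X : String) (Y : String) : Bool :=
  if pvIsT folders X Y then false else pvGoDiv folders X (folders.length + 1) [] Y

-- Pre_ excludes exactly the inputs on which the Python A raises (RecursionError:
-- its visited-free DFS reaches a cycle of folders before any occurrence of X);
-- on every input on which A returns a value, Pre_ holds.
def Pre_is_it_inside (folders : List (String × List String)) (X : String) (Y : String) : Prop :=
  pvDiverges folders X Y = false

instance (folders : List (String × List String)) (X : String) (Y : String) : Decidable (Pre_is_it_inside folders X Y) := by
  unfold Pre_is_it_inside; infer_instance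

def pvWitness_is_it_inside : (List (String × List String)) × String × String :=
  ([("a", ["b", "c"]), ("b", ["c"])], "c", "a")

def Spec_is_it_inside (folders : List (String × List String)) (X : String) (Y : String) (out : Bool) : Prop := out = is_it_inside_alt folders X Y
instance (folders : List (String × List String)) (X : String) (Y : String) (out : Bool) : Decidable (Spec_is_it_inside folders X Y out) := by unfold Spec_is_it_inside; infer_instance

-- ===== CLAIM (what is proved, stated in full; the proofs are below) =====
def Claim_equal_is_it_inside : Prop := ∀ (folders : List (String × List String)) (X : String) (Y : String), Dom_is_it_inside folders X Y → Pre_is_it_inside folders X Y → Spec_is_it_inside folders X Y (is_it_inside folders X Y)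


-- ===== LEMMAS AND PROOFS =====

-- reachability of X from y in at most d edge steps of the folder graph
inductive RIn (folders : List (String × List String)) (X : String) : Nat → String → Prop
  | refl : ∀ d, RIn folders X d X
  | step : ∀ d y c, c ∈ (PySem.Dict.mk folders).getD y [] → RIn folders X d c →
      RIn folders X (d + 1) y

theorem rin_zero {folders : List (String × List String)} {X y : String} :
    RIn folders X 0 y ↔ y = X := by
  constructor
  · intro h; cases h; rfl
  · rintro rfl; exact RIn.refl 0

theorem rin_succ {folders : List (String × List String)} {X y : String} {d : Nat} :
    RIn folders X (d + 1) y ↔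
      y = X ∨ ∃ c ∈ (PySem.Dict.mk folders).getD y [], RIn folders X d c := by
  constructor
  · intro h
    cases h with
    | refl => exact Or.inl rfl
    | step d y c hc hr => exact Or.inr ⟨c, hc, hr⟩
  · rintro (rfl | ⟨c, hc, hr⟩)
    · exact RIn.refl _
    · exact RIn.step d y c hc hr

theorem rin_mono {folders : List (String × List String)} {X y : String} {d : Nat}
    (h : RIn folders X d y) : RIn folders X (d + 1) y := by
  induction h with
  | refl => exact RIn.refl _
  | step d y c hc _ ih => exact RIn.step _ y c hc ih

-- the A side: fuelled DFS decides bounded reachability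
theorem goA_iff_rin (folders : List (String × List String)) (X : String) :
    ∀ (f : Nat) (y : String), goA folders X (f + 1) y = true ↔ RIn folders X (f + 1) y := by
  intro f
  induction f with
  | zero =>
    intro y
    rw [rin_succ]
    simp only [goA]
    by_cases hxy : X = y
    · subst hxy
      simp
    · rw [if_neg (by simpa using hxy)]
      rcases h : (PySem.Dict.mk folders).get? y with _ | lst
      · simp [PySem.Dict.getD_eq_get?_getD, h, eq_comm, hxy]
      · simp only [PySem.Dict.getD_eq_get?_getD, h, Option.getD_some]
        constructor
        · intro hh
          split at hh
          · rename_i hmem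
            rcases List.contains_iff_mem.mp hmem with hX
            exact Or.inr ⟨X, hX, rin_zero.mpr rfl⟩
          · simp at hh
        · rintro (rfl | ⟨c, hc, hr⟩)
          · exact absurd rfl hxy
          · rcases rin_zero.mp hr with rfl
            rw [if_pos (List.contains_iff_mem.mpr hc)]
  | succ f ih =>
    intro y
    rw [rin_succ]
    simp only [goA]
    by_cases hxy : X = y
    · subst hxy
      simp
    · rw [if_neg (by simpa using hxy)]
      rcases h : (PySem.Dict.mk folders).get? y with _ | lst
      · simp [PySem.Dict.getD_eq_get?_getD, h, eq_comm, hxy]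
      · simp only [PySem.Dict.getD_eq_get?_getD, h, Option.getD_some]
        constructor
        · intro hh
          split at hh
          · rename_i hmem
            exact Or.inr ⟨X, List.contains_iff_mem.mp hmem, RIn.refl _⟩
          · rcases List.any_eq_true.mp hh with ⟨c, hc, hgo⟩
            exact Or.inr ⟨c, hc, (ih c).mp hgo⟩
        · rintro (rfl | ⟨c, hc, hr⟩)
          · exact absurd rfl hxy
          · split
            · rfl
            · exact List.any_eq_true.mpr ⟨c, hc, (ih c).mpr hr⟩

-- membership after folding Set.add over a list
theorem mem_foldl_add {s : List String} {l : List String} {z : String} :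
    z ∈ l.foldl (fun a c => PySem.Set.add a c) s ↔ z ∈ s ∨ z ∈ l := by
  induction l generalizing s with
  | nil => simp
  | cons c l ih => simp [ih, PySem.Set.mem_add, or_assoc]

-- membership in one expansion round
theorem mem_stepB {folders : List (String × List String)} {S : List String} {z : String} :
    z ∈ stepB folders S ↔
      z ∈ S ∨ ∃ y ∈ S, z ∈ (PySem.Dict.mk folders).getD y [] := by
  unfold stepB
  suffices h : ∀ (T acc : List String),
      (z ∈ T.foldl (fun nw node => ((PySem.Dict.mk folders).getD node []).foldl (fun s c => PySem.Set.add s c) nw) acc ↔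
        z ∈ acc ∨ ∃ y ∈ T, z ∈ (PySem.Dict.mk folders).getD y []) by
    exact h S S
  intro T
  induction T with
  | nil => simp
  | cons y T ih =>
    intro acc
    simp only [List.foldl_cons, ih, mem_foldl_add]
    constructor
    · rintro (⟨hz | hz⟩ | ⟨w, hw, hz⟩)
      · exact Or.inl hz
      · exact Or.inr ⟨y, List.mem_cons_self, hz⟩
      · exact Or.inr ⟨w, List.mem_cons_of_mem _ hw, hz⟩
    · rintro (hz | ⟨w, hw, hz⟩)
      · exact Or.inl (Or.inl hz)
      · rcases List.mem_cons.mp hw with rfl | hw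
        · exact Or.inl (Or.inr hz)
        · exact Or.inr ⟨w, hw, hz⟩

theorem subset_stepB {folders : List (String × List String)} {S : List String} :
    S ⊆ stepB folders S := fun _ hz => mem_stepB.mpr (Or.inl hz)

-- at a fixpoint the set is closed, so it already contains everything reachable
theorem closed_rin {folders : List (String × List String)} {X : String} {S : List String}
    (hfix : stepB folders S = S) :
    ∀ {d : Nat} {y : String}, RIn folders X d y → y ∈ S → X ∈ S := by
  intro d y h
  induction h with
  | refl => exact fun h => h
  | step d y c hc _ ih =>
    intro hy
    exact ih (hfix ▸ mem_stepB.mpr (Or.inr ⟨y, hy, hc⟩))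

-- the B side: the saturation loop decides bounded reachability
theorem loopB_mem (folders : List (String × List String)) (X : String) :
    ∀ (f : Nat) (S : List String), X ∈ loopB folders f S ↔ ∃ y ∈ S, RIn folders X f y := by
  intro f
  induction f with
  | zero =>
    intro S
    simp only [loopB]
    constructor
    · intro h; exact ⟨X, h, RIn.refl 0⟩
    · rintro ⟨y, hy, hr⟩
      rcases rin_zero.mp hr with rfl
      exact hy
  | succ f ih =>
    intro S
    simp only [loopB]
    by_cases hfix : stepB folders S = S
    · rw [if_pos (by simpa using hfix)]
      constructor
      · intro h; exact ⟨X, h, RIn.refl _⟩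
      · rintro ⟨y, hy, hr⟩; exact closed_rin hfix hr hy
    · rw [if_neg (by simpa using hfix), ih]
      constructor
      · rintro ⟨y, hy, hr⟩
        rcases mem_stepB.mp hy with hy | ⟨w, hw, hy⟩
        · exact ⟨y, hy, rin_mono hr⟩
        · exact ⟨w, hw, RIn.step f w y hy hr⟩
      · rintro ⟨y, hy, hr⟩
        rcases rin_succ.mp hr with rfl | ⟨c, hc, hr2⟩
        · exact ⟨y, subset_stepB hy, RIn.refl f⟩
        · exact ⟨c, mem_stepB.mpr (Or.inr ⟨y, hy, hc⟩), hr2⟩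

-- ===== VERDICT (by name: the statements are the Claim_ definitions above) =====
theorem is_it_inside_spec : Claim_equal_is_it_inside := by
  intro folders X Y _ _
  unfold Spec_is_it_inside is_it_inside is_it_inside_alt
  have hA := goA_iff_rin folders X folders.length Y
  have hB := loopB_mem folders X (folders.length + 1) (PySem.Set.ofList [Y])
  have hBset : X ∈ loopB folders (folders.length + 1) (PySem.Set.ofList [Y]) ↔
      RIn folders X (folders.length + 1) Y := by
    rw [hB]
    constructor
    · rintro ⟨y, hy, hr⟩
      have hyY : y = Y := by simpa using (PySem.Set.mem_ofList _ _).mp hy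
      exact hyY ▸ hr
    · intro hr
      exact ⟨Y, (PySem.Set.mem_ofList _ _).mpr (by simp), hr⟩
  rw [Bool.eq_iff_iff, hA, List.contains_iff_mem]
  exact hBset.symm
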